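-- pv_equiv track=rewrite | github.com/debasishbiswas375-bot/xyz | a/backend/mapping.py | match_ledger
-- ===== SOURCE A (Python) =====
-- def match_ledger(narration, ledger_list, user_map):
--     narration = narration.lower()
--
--     # ==========================
--     # USER LEARNING FIRST
--     # ==========================
--     for key, value in user_map.items():
--         if key in narration:
--             return value
--
--     # ==========================
--     # MASTER LEDGER MATCH
--     # ==========================
--     for ledger in ledger_list:
--         if ledger in narration:
--             return ledger
--
--     # ==========================
--     # KEYWORD RULES
--     # ==========================
--     if any(word in narration for word in ["loan", "emi"]):
--         return "loan account"
--
--     if any(word in narration for word in ["salary"]):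
--         return "salary account"
--
--     if any(word in narration for word in ["fuel", "petrol", "hpcl", "indianoil"]):
--         return "fuel expense"
--
--     if any(word in narration for word in ["amazon", "flipkart", "swiggy", "zomato"]):
--         return "shopping expense"
--
--     if any(word in narration for word in ["upi", "gpay", "phonepe"]):
--         return "upi transactions"
--
--     if any(word in narration for word in ["rent"]):
--         return "rent expense"
--
--     # ==========================
--     # DEFAULT
--     # ==========================
--     return "suspense"
-- ===== SOURCE B (Python) =====
-- _KEYWORD_RULES = [
--     ("loan", "loan account"), ("emi", "loan account"),
--     ("salary", "salary account"),
--     ("fuel", "fuel expense"), ("petrol", "fuel expense"),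
--     ("hpcl", "fuel expense"), ("indianoil", "fuel expense"),
--     ("amazon", "shopping expense"), ("flipkart", "shopping expense"),
--     ("swiggy", "shopping expense"), ("zomato", "shopping expense"),
--     ("upi", "upi transactions"), ("gpay", "upi transactions"),
--     ("phonepe", "upi transactions"),
--     ("rent", "rent expense"),
-- ]
--
-- def match_ledger(narration, ledger_list, user_map):
--     narration = narration.lower()
--     patterns = list(user_map.items()) + [(l, l) for l in ledger_list] + _KEYWORD_RULES
--     # Phase 0: index the patterns by their first character (an empty pattern
--     # occurs in every text, so it is matched outright).
--     matched = set()
--     buckets = {}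
--     for pattern, _label in patterns:
--         if pattern:
--             buckets.setdefault(pattern[0], []).append(pattern)
--         else:
--             matched.add(pattern)
--     # Phase 1: scan the text — at each position, only patterns whose first
--     # character is the one standing there can occur; record those that do.
--     for i, ch in enumerate(narration):
--         for pattern in buckets.get(ch, []):
--             if narration.startswith(pattern, i):
--                 matched.add(pattern)
--     # Phase 2: resolve priority against the matched set.
--     for pattern, label in patterns:
--         if pattern in matched:
--             return label
--     return "suspense"
-- ===== Notes on version B (the rewrite author's own statement) =====
-- stated objective: alternative
-- what changed: Instead of testing each pattern tier-by-tier with the substring operator, B indexes the patterns by first character, scans the text once recording in a set every pattern that starts at some position (multi-pattern matching with a first-character bucket index), and resolves priority by looking each pattern up in that set.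
import Mathlib
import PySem

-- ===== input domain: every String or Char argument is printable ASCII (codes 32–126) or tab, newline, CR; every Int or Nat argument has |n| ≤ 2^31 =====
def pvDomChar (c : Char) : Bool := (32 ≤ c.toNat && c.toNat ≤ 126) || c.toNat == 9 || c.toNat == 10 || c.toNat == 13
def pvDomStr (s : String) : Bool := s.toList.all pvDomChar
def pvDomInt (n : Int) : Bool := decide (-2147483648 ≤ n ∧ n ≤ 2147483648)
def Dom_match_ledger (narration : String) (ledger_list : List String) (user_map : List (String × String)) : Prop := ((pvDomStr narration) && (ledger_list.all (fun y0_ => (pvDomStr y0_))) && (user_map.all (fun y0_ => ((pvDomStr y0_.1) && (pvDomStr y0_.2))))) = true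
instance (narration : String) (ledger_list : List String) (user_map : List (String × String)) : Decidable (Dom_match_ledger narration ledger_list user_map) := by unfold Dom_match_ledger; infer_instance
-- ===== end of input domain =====

-- B replaces A's tier-by-tier substring tests by multi-pattern text matching: the patterns are
-- indexed by first character, one scan over the lowered narration collects the set of patterns
-- occurring anywhere, and priority is resolved against that set; objective: alternative.
-- A is total; equivalence proved on the whole domain.


-- ===== PORT A =====
-- 'for key, value in user_map.items(): if key in narration: return value'
def aUserLoop (narr : String) : List (String × String) → Option String
  | [] => none
  | (k, v) :: rest => if PySem.Str.isIn k narr then some v else aUserLoop narr rest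

-- 'for ledger in ledger_list: if ledger in narration: return ledger'
def aLedgerLoop (narr : String) : List String → Option String
  | [] => none
  | l :: rest => if PySem.Str.isIn l narr then some l else aLedgerLoop narr rest

-- 'any(word in narration for word in ws)'
def aAny (narr : String) (ws : List String) : Bool := ws.any (fun w => PySem.Str.isIn w narr)

def match_ledger (narration : String) (ledger_list : List String) (user_map : List (String × String)) : String :=
  let narr := PySem.Str.lower narration
  match aUserLoop narr (PySem.Dict.ofList user_map).items with
  | some v => v
  | none =>
    match aLedgerLoop narr ledger_list with
    | some l => l
    | none =>
      if aAny narr ["loan", "emi"] then "loan account"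
      else if aAny narr ["salary"] then "salary account"
      else if aAny narr ["fuel", "petrol", "hpcl", "indianoil"] then "fuel expense"
      else if aAny narr ["amazon", "flipkart", "swiggy", "zomato"] then "shopping expense"
      else if aAny narr ["upi", "gpay", "phonepe"] then "upi transactions"
      else if aAny narr ["rent"] then "rent expense"
      else "suspense"

-- ===== PORT B =====
def bKeywordRules : List (String × String) :=
  [("loan", "loan account"), ("emi", "loan account"),
   ("salary", "salary account"),
   ("fuel", "fuel expense"), ("petrol", "fuel expense"),
   ("hpcl", "fuel expense"), ("indianoil", "fuel expense"),
   ("amazon", "shopping expense"), ("flipkart", "shopping expense"),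
   ("swiggy", "shopping expense"), ("zomato", "shopping expense"),
   ("upi", "upi transactions"), ("gpay", "upi transactions"),
   ("phonepe", "upi transactions"),
   ("rent", "rent expense")]

-- phase 0: 'for pattern, _label in patterns: if pattern: buckets.setdefault(pattern[0], []).append(pattern)
--           else: matched.add(pattern)'  ('if pattern:' is truthiness = non-emptiness; pattern[0] is its head)
def bIndex (patterns : List (String × String)) : PySem.Dict Char (List String) × PySem.Set String :=
  patterns.foldl (fun bm pl =>
    match pl.1.toList with
    | [] => (bm.1, PySem.Set.add bm.2 pl.1)
    | c :: _ => (bm.1.modify c [] (fun ps => ps ++ [pl.1]), bm.2)) ((PySem.Dict.empty : PySem.Dict Char (List String)), PySem.Set.empty)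

-- phase 1 inner loop: 'for pattern in buckets.get(ch, []): if narration.startswith(pattern, i): matched.add(pattern)'
-- Python's 'narr.startswith(p, i)' with 0 ≤ i ≤ len(narr) (all i enumerate yields) is exactly
-- 'narr[i:].startswith(p)', ported as startswith of the slice.
def bMarkAt (narr : String) (i : Int) (ps : List String) (m : PySem.Set String) : PySem.Set String :=
  ps.foldl (fun m p => if PySem.Str.startswith (PySem.Str.slice narr (some i) none) p then PySem.Set.add m p else m) m

-- phase 2: 'for pattern, label in patterns: if pattern in matched: return label / return "suspense"'
def bResolve (matched : PySem.Set String) : List (String × String) → String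
  | [] => "suspense"
  | (p, lab) :: rest => if PySem.Set.contains matched p then lab else bResolve matched rest

def match_ledger_alt (narration : String) (ledger_list : List String) (user_map : List (String × String)) : String :=
  let narr := PySem.Str.lower narration
  let patterns := (PySem.Dict.ofList user_map).items ++ ledger_list.map (fun l => (l, l)) ++ bKeywordRules
  let bm := bIndex patterns
  let matched := (PySem.List.enumerate narr.toList).foldl (fun m ic => bMarkAt narr ic.1 (bm.1.getD ic.2 []) m) bm.2
  bResolve matched patterns

-- ===== PRECONDITION & SPEC =====
def Spec_match_ledger (narration : String) (ledger_list : List String) (user_map : List (String × String)) (out : String) : Prop := out = match_ledger_alt narration ledger_list user_map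
instance (narration : String) (ledger_list : List String) (user_map : List (String × String)) (out : String) : Decidable (Spec_match_ledger narration ledger_list user_map out) := by unfold Spec_match_ledger; infer_instance

-- ===== CLAIM =====
def Claim_equal_match_ledger : Prop := ∀ (narration : String) (ledger_list : List String) (user_map : List (String × String)), Dom_match_ledger narration ledger_list user_map → Spec_match_ledger narration ledger_list user_map (match_ledger narration ledger_list user_map)

-- ===== LEMMAS AND PROOFS =====
-- Proof-side abstraction: first-hit scan of a (pattern,label) table by the substring test.
def bScan (narr : String) : List (String × String) → String
  | [] => "suspense"
  | (p, lab) :: rest => if PySem.Str.isIn p narr then lab else bScan narr rest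

-- membership after the inner marking loop at one position
theorem mem_bMarkAt (narr : String) (i : Int) (ps : List String) (m : PySem.Set String) (x : String) :
    x ∈ bMarkAt narr i ps m ↔
      x ∈ m ∨ (x ∈ ps ∧ PySem.Str.startswith (PySem.Str.slice narr (some i) none) x = true) := by
  induction ps generalizing m with
  | nil => simp [bMarkAt]
  | cons p rest ih =>
    have hstep : bMarkAt narr i (p :: rest) m =
        bMarkAt narr i rest
          (if PySem.Str.startswith (PySem.Str.slice narr (some i) none) p then PySem.Set.add m p else m) := rfl
    rw [hstep, ih]
    by_cases h : PySem.Str.startswith (PySem.Str.slice narr (some i) none) p = true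
    · simp only [if_pos h, PySem.Set.mem_add]
      constructor
      · rintro ((hs | hx) | ⟨hq, hsw⟩)
        · exact Or.inl hs
        · exact Or.inr ⟨by rw [hx]; exact List.mem_cons_self, by rw [hx]; exact h⟩
        · exact Or.inr ⟨List.mem_cons_of_mem _ hq, hsw⟩
      · rintro (hs | ⟨hq, hsw⟩)
        · exact Or.inl (Or.inl hs)
        · rcases List.mem_cons.mp hq with h1 | h2
          · exact Or.inl (Or.inr h1)
          · exact Or.inr ⟨h2, hsw⟩
    · rw [if_neg h]
      constructor
      · rintro (hs | ⟨hq, hsw⟩)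
        · exact Or.inl hs
        · exact Or.inr ⟨List.mem_cons_of_mem _ hq, hsw⟩
      · rintro (hs | ⟨hq, hsw⟩)
        · exact Or.inl hs
        · rcases List.mem_cons.mp hq with h1 | h2
          · exact absurd (h1 ▸ hsw) h
          · exact Or.inr ⟨h2, hsw⟩

-- membership after the whole text scan (over any list of (position, character) pairs)
theorem mem_textScan (narr : String) (B : PySem.Dict Char (List String))
    (L : List (Int × Char)) (m : PySem.Set String) (x : String) :
    x ∈ L.foldl (fun m ic => bMarkAt narr ic.1 (B.getD ic.2 []) m) m ↔
      x ∈ m ∨ ∃ ic ∈ L, x ∈ B.getD ic.2 [] ∧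
        PySem.Str.startswith (PySem.Str.slice narr (some ic.1) none) x = true := by
  induction L generalizing m with
  | nil => simp
  | cons ic rest ih =>
    simp only [List.foldl_cons]
    rw [ih, mem_bMarkAt]
    constructor
    · rintro ((hs | h) | ⟨j, hj, hh⟩)
      · exact Or.inl hs
      · exact Or.inr ⟨ic, List.mem_cons_self, h.1, h.2⟩
      · exact Or.inr ⟨j, List.mem_cons_of_mem _ hj, hh⟩
    · rintro (hs | ⟨j, hj, hh⟩)
      · exact Or.inl (Or.inl hs)
      · rcases List.mem_cons.mp hj with h1 | h2
        · exact Or.inl (Or.inr (h1 ▸ hh))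
        · exact Or.inr ⟨j, h2, hh⟩

-- phase 0, matched component: exactly the empty patterns of the table
theorem mem_bIndex_snd (patterns : List (String × String))
    (bm : PySem.Dict Char (List String) × PySem.Set String) (x : String) :
    x ∈ (patterns.foldl (fun bm pl =>
      match pl.1.toList with
      | [] => (bm.1, PySem.Set.add bm.2 pl.1)
      | c :: _ => (bm.1.modify c [] (fun ps => ps ++ [pl.1]), bm.2)) bm).2 ↔
      x ∈ bm.2 ∨ (∃ pl ∈ patterns, pl.1 = x) ∧ x.toList = [] := by
  induction patterns generalizing bm with
  | nil => simp
  | cons pl rest ih =>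
    simp only [List.foldl_cons]
    rcases hc : pl.1.toList with _ | ⟨c, cs⟩
    · rw [ih]
      simp only [PySem.Set.mem_add]
      constructor
      · rintro ((hs | hx) | ⟨⟨q, hq, hqx⟩, hemp⟩)
        · exact Or.inl hs
        · exact Or.inr ⟨⟨pl, List.mem_cons_self, hx.symm⟩, by rw [hx]; exact hc⟩
        · exact Or.inr ⟨⟨q, List.mem_cons_of_mem _ hq, hqx⟩, hemp⟩
      · rintro (hs | ⟨⟨q, hq, hqx⟩, hemp⟩)
        · exact Or.inl (Or.inl hs)
        · rcases List.mem_cons.mp hq with h1 | h2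
          · exact Or.inl (Or.inr (by rw [← hqx, h1]))
          · exact Or.inr ⟨⟨q, h2, hqx⟩, hemp⟩
    · rw [ih]
      constructor
      · rintro (hs | ⟨⟨q, hq, hqx⟩, hemp⟩)
        · exact Or.inl hs
        · exact Or.inr ⟨⟨q, List.mem_cons_of_mem _ hq, hqx⟩, hemp⟩
      · rintro (hs | ⟨⟨q, hq, hqx⟩, hemp⟩)
        · exact Or.inl hs
        · rcases List.mem_cons.mp hq with h1 | h2
          · rw [h1] at hqx; rw [← hqx, hc] at hemp; exact absurd hemp (by simp)
          · exact Or.inr ⟨⟨q, h2, hqx⟩, hemp⟩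

-- phase 0, bucket component: the bucket of c holds exactly the table patterns starting with c
theorem mem_bIndex_fst (patterns : List (String × String))
    (bm : PySem.Dict Char (List String) × PySem.Set String) (c : Char) (x : String) :
    x ∈ ((patterns.foldl (fun bm pl =>
      match pl.1.toList with
      | [] => (bm.1, PySem.Set.add bm.2 pl.1)
      | c :: _ => (bm.1.modify c [] (fun ps => ps ++ [pl.1]), bm.2)) bm).1.getD c []) ↔
      x ∈ bm.1.getD c [] ∨ (∃ pl ∈ patterns, pl.1 = x) ∧ x.toList.head? = some c := by
  induction patterns generalizing bm with
  | nil => simp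
  | cons pl rest ih =>
    simp only [List.foldl_cons]
    rcases hc : pl.1.toList with _ | ⟨c', cs⟩
    · rw [ih]
      constructor
      · rintro (hs | ⟨⟨q, hq, hqx⟩, hhd⟩)
        · exact Or.inl hs
        · exact Or.inr ⟨⟨q, List.mem_cons_of_mem _ hq, hqx⟩, hhd⟩
      · rintro (hs | ⟨⟨q, hq, hqx⟩, hhd⟩)
        · exact Or.inl hs
        · rcases List.mem_cons.mp hq with h1 | h2
          · rw [h1] at hqx; rw [← hqx, hc] at hhd; exact absurd hhd (by simp)
          · exact Or.inr ⟨⟨q, h2, hqx⟩, hhd⟩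
    · rw [ih]
      by_cases hcc : c = c'
      · subst hcc
        rw [PySem.Dict.getD_modify_self]
        simp only [List.mem_append, List.mem_singleton]
        constructor
        · rintro ((hs | hx) | ⟨⟨q, hq, hqx⟩, hhd⟩)
          · exact Or.inl hs
          · exact Or.inr ⟨⟨pl, List.mem_cons_self, hx.symm⟩, by rw [hx, hc]; rfl⟩
          · exact Or.inr ⟨⟨q, List.mem_cons_of_mem _ hq, hqx⟩, hhd⟩
        · rintro (hs | ⟨⟨q, hq, hqx⟩, hhd⟩)
          · exact Or.inl (Or.inl hs)
          · rcases List.mem_cons.mp hq with h1 | h2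
            · exact Or.inl (Or.inr (by rw [← hqx, h1]))
            · exact Or.inr ⟨⟨q, h2, hqx⟩, hhd⟩
      · rw [PySem.Dict.getD_modify_of_ne _ _ _ hcc]
        constructor
        · rintro (hs | ⟨⟨q, hq, hqx⟩, hhd⟩)
          · exact Or.inl hs
          · exact Or.inr ⟨⟨q, List.mem_cons_of_mem _ hq, hqx⟩, hhd⟩
        · rintro (hs | ⟨⟨q, hq, hqx⟩, hhd⟩)
          · exact Or.inl hs
          · rcases List.mem_cons.mp hq with h1 | h2
            · rw [h1] at hqx; rw [← hqx, hc] at hhd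
              exact absurd (Option.some_injective _ hhd.symm) hcc
            · exact Or.inr ⟨⟨q, h2, hqx⟩, hhd⟩

-- a pattern of the table is in the matched set iff it occurs as a substring
theorem contains_matched (narr : String) (patterns : List (String × String))
    (x : String) (hx : ∃ pl ∈ patterns, pl.1 = x) :
    PySem.Set.contains
      ((PySem.List.enumerate narr.toList).foldl
        (fun m ic => bMarkAt narr ic.1 ((bIndex patterns).1.getD ic.2 []) m) (bIndex patterns).2) x
      = PySem.Str.isIn x narr := by
  rw [Bool.eq_iff_iff]
  have hcont : ∀ (s : PySem.Set String), PySem.Set.contains s x = true ↔ x ∈ s := by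
    intro s; simp [PySem.Set.contains]
  rw [hcont, mem_textScan]
  unfold bIndex
  rw [mem_bIndex_snd]
  simp only [PySem.Set.empty, List.not_mem_nil, false_or]
  constructor
  · rintro (⟨-, hemp⟩ | ⟨ic, hic, hbuck, hsw⟩)
    · rw [PySem.Str.isIn_iff_infix, hemp]
      exact List.nil_infix
    · rcases (PySem.List.mem_enumerate_iff _ _ _).mp hic with ⟨k, hk, hik⟩
      have h0 : (0:Int) ≤ ic.1 := by rw [hik]; positivity
      have hpre : x.toList <+: (PySem.Str.slice narr (some ic.1) none).toList := by
        rw [← PySem.Chars.startswith_iff]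
        simpa [PySem.Str.startswith_eq] using hsw
      rw [PySem.Str.toList_slice, PySem.Chars.slice_eq_listSlice,
        PySem.List.slice_from narr.toList h0] at hpre
      exact PySem.Str.isIn_iff_infix x narr |>.mpr
        (hpre.isInfix.trans (List.drop_suffix ic.1.toNat narr.toList).isInfix)
  · intro hin
    rcases hhd : x.toList with _ | ⟨ch, cs⟩
    · exact Or.inl ⟨hx, rfl⟩
    · rcases (PySem.Str.isIn_iff_infix x narr).mp hin with ⟨pre, suf, hdec⟩
      have hdrop : narr.toList.drop pre.length = x.toList ++ suf := by
        rw [← hdec, List.append_assoc, List.drop_left]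
      have hk : pre.length < narr.toList.length := by
        rw [← hdec, hhd]; simp only [List.length_append, List.length_cons]; omega
      refine Or.inr ⟨((0 : Int) + (pre.length : Int), narr.toList[pre.length]),
        (PySem.List.mem_enumerate_iff _ _ _).mpr ⟨pre.length, hk, rfl⟩, ?_, ?_⟩
      · rw [mem_bIndex_fst]
        refine Or.inr ⟨hx, ?_⟩
        have hgk : narr.toList[pre.length]? = some ch := by
          rw [← List.head?_drop, hdrop, hhd]; rfl
        rw [List.getElem?_eq_getElem hk] at hgk
        rw [hhd, List.head?_cons, Option.some_injective _ hgk]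
      · rw [PySem.Str.startswith_eq, PySem.Chars.startswith_iff,
          PySem.Str.toList_slice, PySem.Chars.slice_eq_listSlice,
          PySem.List.slice_from narr.toList (by positivity)]
        have : ((0 : Int) + (pre.length : Int)).toNat = pre.length := by omega
        rw [this, hdrop]
        exact ⟨suf, rfl⟩

-- phase 2 over the matched set is the first-hit substring scan
theorem bResolve_eq_bScan (narr : String) (matched : PySem.Set String)
    (table : List (String × String))
    (h : ∀ pl ∈ table, PySem.Set.contains matched pl.1 = PySem.Str.isIn pl.1 narr) :
    bResolve matched table = bScan narr table := by
  induction table with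
  | nil => rfl
  | cons pl rest ih =>
    obtain ⟨p, lab⟩ := pl
    simp only [bResolve, bScan]
    rw [h (p, lab) (by simp)]
    split_ifs
    · rfl
    · exact ih (fun q hq => h q (by simp [hq]))

-- B computes the first-hit substring scan of its table
theorem alt_eq_bScan (narration : String) (ledger_list : List String)
    (user_map : List (String × String)) :
    match_ledger_alt narration ledger_list user_map =
      bScan (PySem.Str.lower narration)
        ((PySem.Dict.ofList user_map).items ++ ledger_list.map (fun l => (l, l)) ++ bKeywordRules) := by
  unfold match_ledger_alt
  exact bResolve_eq_bScan _ _ _ (fun pl hpl => contains_matched _ _ _ ⟨pl, hpl, rfl⟩)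

-- Scanning the table is: first-hit in a pair list, then continue into the tail of the table.
theorem bScan_append_pairs (narr : String) (xs ys : List (String × String)) :
    bScan narr (xs ++ ys) = match aUserLoop narr xs with
      | some v => v
      | none => bScan narr ys := by
  induction xs with
  | nil => simp [aUserLoop]
  | cons kv rest ih =>
    obtain ⟨k, v⟩ := kv
    simp only [List.cons_append, bScan, aUserLoop]
    split_ifs with h
    · rfl
    · exact ih

-- The (l, l) segment of the table is exactly A's ledger loop.
theorem bScan_ledger (narr : String) (ls : List String) (ys : List (String × String)) :
    bScan narr (ls.map (fun l => (l, l)) ++ ys) = match aLedgerLoop narr ls with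
      | some v => v
      | none => bScan narr ys := by
  induction ls with
  | nil => simp [aLedgerLoop]
  | cons l rest ih =>
    simp only [List.map_cons, List.cons_append, bScan, aLedgerLoop]
    split_ifs with h
    · rfl
    · exact ih

-- One keyword tier (all labels equal) scans as A's any()-test over its words.
theorem bScan_tier (narr lab : String) (ws : List String) (ys : List (String × String)) :
    bScan narr (ws.map (fun w => (w, lab)) ++ ys) = if aAny narr ws then lab else bScan narr ys := by
  induction ws with
  | nil => simp [aAny]
  | cons w rest ih =>
    have hstep : bScan narr ((w, lab) :: (rest.map (fun w => (w, lab)) ++ ys)) =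
        if PySem.Str.isIn w narr then lab
        else bScan narr (rest.map (fun w => (w, lab)) ++ ys) := rfl
    have ha : aAny narr (w :: rest) = (PySem.Str.isIn w narr || aAny narr rest) := by
      simp [aAny]
    rw [List.map_cons, List.cons_append, hstep, ih, ha]
    cases PySem.Str.isIn w narr <;> simp

-- The keyword segment of the table is exactly A's if-chain of any()-tests.
theorem bScan_keywords (narr : String) :
    bScan narr bKeywordRules =
      (if aAny narr ["loan", "emi"] then "loan account"
      else if aAny narr ["salary"] then "salary account"
      else if aAny narr ["fuel", "petrol", "hpcl", "indianoil"] then "fuel expense"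
      else if aAny narr ["amazon", "flipkart", "swiggy", "zomato"] then "shopping expense"
      else if aAny narr ["upi", "gpay", "phonepe"] then "upi transactions"
      else if aAny narr ["rent"] then "rent expense"
      else "suspense") := by
  have h : bKeywordRules =
      ["loan", "emi"].map (fun w => (w, "loan account")) ++
      (["salary"].map (fun w => (w, "salary account")) ++
      (["fuel", "petrol", "hpcl", "indianoil"].map (fun w => (w, "fuel expense")) ++
      (["amazon", "flipkart", "swiggy", "zomato"].map (fun w => (w, "shopping expense")) ++
      (["upi", "gpay", "phonepe"].map (fun w => (w, "upi transactions")) ++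
      (["rent"].map (fun w => (w, "rent expense")) ++ []))))) := rfl
  rw [h, bScan_tier, bScan_tier, bScan_tier, bScan_tier, bScan_tier, bScan_tier]
  rfl

-- ===== VERDICT (by name: the statement is the Claim_ definition above) =====
theorem match_ledger_spec : Claim_equal_match_ledger := by
  intro narration ledger_list user_map _
  unfold Spec_match_ledger match_ledger
  rw [alt_eq_bScan, List.append_assoc, bScan_append_pairs, bScan_ledger, bScan_keywords]
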